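/-
  THE SEGMENTS OF `DGifSlurp` (dgif_lib.c:1186-1324; 213 instructions at 10A680H … 10A9FCH; a PROTECTED frame: `RecordType`,
  `ExtFunction`, `ExtData`; contract: Gif/Spec/Slurp.lean `DGifSlurp.spec`; design/CONTRACTS.md entry 19; design/units/DGifSlurp.tsv):
  the assertions at its cut points, the segment claims, and the COMPOSITION (segments ⇒ the contract), proved here.
  The form: Gif/Spec/ReaderSegs.lean (`DGifGetWord`), Gif/Spec/Seg_DGifGetScreenDesc.lean (a protected function with a loop),
  Gif/Spec/Seg_DGifGetImageDesc.lean (the ghosts `Hc Fc` that change).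

      unit  design   from      to (exits)                        what it walks                                             instr.
      P     —        10A680H   10A6D3H                           six pushes, `sub rsp, 104`, `rbp = gif`, the frame's header, the
                                                                 shadow index in `r14`, the three poison stores                 16
      1     SL.0     10A6D3H   10A82AH                           l.1193-1194: `ExtensionBlocks = NULL`, `ExtensionBlockCount = 0`
                                                                 (two checked stores), `jmp` to the loop head                    7
      2     SL.H     10A82AH   10A6F9H | 10A853H | 10A81FH | 10A8EDH
                                                                 THE HEAD OF THE RECORD LOOP l.1197-1201: DGifGetRecordType(gif,
                                                                 &RecordType); error: return; the dispatch on `RecordType`      11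
      3     SL.I     10A6F9H   10A70BH | 10A8EDH                 l.1203: DGifGetImageDesc(gif); error: return                    5
      4     SL.I1    10A70BH   10A777H | 10A8EDH                 l.1207-1214: `sp = &SavedImages[ImageCount − 1]` in `r12`, the
                                                                 three range tests (`Width`, `Height` as SIGNED ints `> 0`,
                                                                 `Width ≤ INT_MAX / Height`: `idiv`); a test fails (10A914H):
                                                                 DGifDecreaseImageCounter, `ebx = 0`, return                24 + 4
      5     SL.I2    10A777H   10A7BDH | 10A948H | 10A8EDH       l.1216-1230: `ImageSize = Width · Height` (`imul`),
                                                                 `openbsd_reallocarray(NULL, ImageSize, 1)`, the checked store of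
                                                                 `sp->RasterBits` (THE RASTER IS ADOPTED); NULL (10A923H):
                                                                 DGifDecreaseImageCounter, return; the test of
                                                                 `sp->ImageDesc.Interlace`; interlaced: `i = 0` (10A942H)   15 + 4 + 1
      6     SL.NI    10A7BDH   10A7D4H | 10A8EDH                 l.1259-1262: DGifGetLine(gif, RasterBits, ImageSize); error
                                                                 (10A9C0H): DGifDecreaseImageCounter, return                 7 + 3
      7     SL.IL    10A948H   10A96AH | 10A7D4H                 THE HEAD OF THE PASS LOOP l.1241-1242: `i < 4`? no: to the move;
                                                                 `j = InterlacedOffset[i]` (a checked load of the registered table) 6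
      8     SL.IL    10A96AH   10A96AH | 10A948H | 10A8EDH       THE HEAD OF THE ROW LOOP l.1243-1254: `j < Height`? no: `i++`
                                                                 (10A93CH), to the pass head; DGifGetLine(gif, RasterBits + j · Width,
                                                                 Width); error (10A932H): DGifDecreaseImageCounter, return;
                                                                 `j += InterlacedJumps[i]` (a checked load)          4 + 12 + 5 + 2 + 3
      9     SL.M     10A7D4H   10A81FH                           THE MOVE l.1266-1273: `gif.ExtensionBlocks ≠ NULL`: the four stores
                                                                 (`sp->ExtensionBlocks`, `sp->ExtensionBlockCount`, the two fields of
                                                                 gif nulled) ALL INSIDE THIS SEGMENT                            16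
      10    SL.E     10A853H   10A8A2H | 10A8EDH                 l.1277-1289: DGifGetExtension(gif, &ExtFunction, &ExtData); error:
                                                                 return; `ExtData ≠ NULL` (W-1): GifAddExtensionBlock(…, ExtFunction,
                                                                 ExtData[0], &ExtData[1]); error: return                        23
      11    SL.E1    10A8A2H   10A8A2H | 10A81FH | 10A8EDH       THE HEAD OF THE SUB-BLOCK LOOP l.1290-1306: DGifGetExtensionNext(gif,
                                                                 &ExtData); error: return; NULL: the record is done;
                                                                 GifAddExtensionBlock(…, 0, ExtData[0], &ExtData[1]); error: return  21
      12    SL.W/X   10A81FH   10A82AH | 10A8EDH                 l.1315-1323: `RecordType ≠ TERMINATE`: back to the head; otherwise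
                                                                 `ImageCount = 0`: the checked store of `gif.Error`; the result  2 + 11
      E     RET      10A8EDH   ret                               the two stores that clear the frame's shadow, `eax = ebx`,
                                                                 `add rsp, 104`, six pops, `ret`                                11
      COMPOSITION                                                `compose`, proved below

  THE FRAME (Gif/Frames.lean `DGifSlurp`, c/gif/gif_FRAMES.txt): six pushes (`r15 r14 r13 r12 rbp rbx`) and `sub rsp, 104`: `rsp = RA − 152`
  in the body; the protected frame's base is `RA − 152`, 96 bytes; its objects: `RecordType` (4 bytes) at `base + 32 = rsp + 20H`,
  `ExtFunction` (4 bytes) at `base + 48 = rsp + 30H`, `ExtData` (8 bytes) at `base + 64 = rsp + 40H`.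
  THE REGISTERS: `rbp = gif` and `r14` = the shadow index `(RA − 152) >> 3` from the prologue to the epilogue. `r12 = sp` (the last
  counted slot) from 10A730H to the end of the move 10A80BH (in the extension arm `r12 = &ExtData[1]`, a scratch). `ebx` = the result of
  the last call (THE RESULT travels in `ebx` to the epilogue: `mov eax, ebx` at 10A903H; the contract says nothing about it),
  `Width` from 10A73FH, `ImageSize` from 10A777H to 10A7BDH. `r13` = the raster from 10A78CH to 10A7BFH, `j` in the interlace loops
  (zero-extended: `mov r13d, …`, `add r13d, …`). `r15d = i`, the pass (zero-extended).

  THE GHOSTS THAT CHANGE: `Hc` (the present heap) and `Fc` (the present forest) are parameters of every assertion of the body besides the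
  entry's `H`, `F`; `SameRegion H Hc`, `Fc.gif = F.gif`, `Fc.pv = F.pv` relate them (what the post asks). NO POINTER DANGLES AT A CUT:
  the state invariant `GifOK Hc Fc R v.mem` holds at every one. What changes from cut to cut is what is known of the LAST counted image.

  THE LOOPS. Four loop heads are cuts, each with its measure as a ghost number:
      10A82AH  the record loop        `m`   `rem R v.mem = m`; a successful DGifGetRecordType consumes exactly one byte: everything behind
                                            it up to the next head carries `rem R v.mem < m`
      10A8A2H  the sub-block loop     `k`   `rem R v.mem = k`, `k < m`; a successful DGifGetExtensionNext consumes at least one byte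
      10A948H  the pass loop          `a`   `i + a = 4`
      10A96AH  the row loop           `b`   `Height − j = b` (with `a` fixed, `1 ≤ a`)
  The composition is a strong induction on `m`; inside it on `k`, and on `a` with one on `b` inside.

  THE CARRY LEMMAS of these assertions are in Gif/Spec/SlurpCarry.lean (this file holds assertions, claims and the composition only):
  `Core.carry`, `At.push_win`, `At.carry_loose`, `At.carry_eq`, `At.env_callee` (a callee's `Env`), `At.after_call` (`At` at the state a
  contract call returned to), the facts of the last counted image and its raster, the move of segment 9 as one step (`GifOK.move_pend`).
  The shape of a segment proof with them: farm.gif/hints/DGifSlurp.md; worked: farm.gif/worked/DGifSlurp.6, .8, .9.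

  W-1 (l.1282 `if (ExtData != NULL)`) and F-4 are pending behaviour decisions: no assertion says WHICH arm ran (`ExtHead` is the same
  behind both arms of l.1282).
-/
import Gif.Spec.Slurp
import Gif.LabelsAt
namespace Gif.Spec
open X86 X86.User Asan ProgX.Base ProgX.Base.Spec

namespace DGifSlurp

/-! ### Two facts about the forest that the segment proofs use (proved here, once) -/

/-- **Every counted image has its raster**, said of the list of counted images (`Forest.imgs`): the form in which the posts of
DGifGetImageDesc and DGifDecreaseImageCounter speak (`F'.imgs = F.imgs ++ [g]`, `F'.imgs = init`). -/
theorem complete_iff_imgs (F : Forest) : F.Complete ↔ ∀ g, g ∈ F.imgs → g.raster ≠ none := by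
  unfold Forest.Complete Forest.imgs
  cases F.saved with
  | none =>
    constructor
    · intro _ g hg
      exact absurd hg List.not_mem_nil
    · intro _ s hs
      exact absurd hs (by simp only [reduceCtorEq, not_false_eq_true])
  | some s =>
    constructor
    · intro h g hg
      exact h s rfl g hg
    · intro h s' hs' g hg
      have e : s = s' := Option.some.inj hs'
      rw [← e] at hg
      exact h g hg

/-- **The forest without its pending list owns a sublist** (segment 1: the two stores of l.1193-1194 drop whatever list was
pending; on the path there is none). -/
theorem owned_drop_pend (F : Forest) : ({ F with pend := none } : Forest).owned.Sublist F.owned := by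
  unfold Forest.owned
  simp only [Exts.objs, List.append_nil]
  apply List.Sublist.cons_cons
  apply List.Sublist.cons_cons
  exact List.sublist_append_left _ _

/-- **THE RASTER IS ADOPTED** (l.1222): the forest whose last image got the raster `(r, n)` owns the old forest's objects and `(r, n)`
(for `Owns.push_cons` and `Owns.perm`). -/
theorem owned_set_raster (Fc : Forest) (s : Saved) (init : List Img) (g : Img) (r n : Nat) (hs : Fc.saved = some s)
    (hi : s.imgs = init ++ [g]) (hg : g.raster = none) :
    ({ Fc with saved := some { s with imgs := init ++ [{ g with raster := some (r, n) }] } } : Forest).owned.Perm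
      ((r, n) :: Fc.owned) := by
  unfold Forest.owned
  rw [hs]
  unfold Saved.objs
  simp only
  rw [hi]
  unfold Img.objs
  simp only [hg, rasterObjs, List.flatMap_append, List.flatMap_cons, List.flatMap_nil, List.append_nil, List.append_assoc,
    List.cons_append, List.nil_append]
  rw [List.perm_iff_count]
  intro x
  simp only [List.count_cons, List.count_append]
  omega

/-! ### The assertions -/

/-- The active frames inside the body: the function's own protected frame (`base = RA − 152`), innermost. -/
abbrev framesIn (frames : List (Nat × FrameLayout)) (e : State) : List (Nat × FrameLayout) :=
  ((e.reg .rsp).toNat - 152, Gif.Frames.DGifSlurp) :: frames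

/-- **WHAT EVERY CUT OF THE BODY SHARES** (nothing of it mentions the present heap or forest): the state `v` stands at the address
`cut`, inside the call that was entered at the state `e` (return address `ret`) with the function's precondition. The prologue is
done: six registers saved (`r15 r14 r13 r12 rbp rbx` in push order), `rsp = RA − 152`, `rbp = gif` (never changed afterwards), `r14` =
the shadow index of the frame (`(RA − 152) >> 3`: the epilogue's stores address `[r14 + C00000H]`, `[r14 + C00008H]`); nothing was
written but the function's stack, the frame's 12 shadow bytes and the contract's windows (the heap's region, its shadow, the
cursor's `cur`): the return address is in its slot; the reader did not go back. No callee-saved register is left untouched: all six are pushed. `rbx r12 r13 r15` are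
locals: what they hold is said by the assertion of each cut. -/
structure Core (cut : Word) (H : Heap) (rest : List Obj) (frames : List (Nat × FrameLayout)) (F : Forest) (R : Rd) (u₀ e : State)
    (ret : Word) (v : State) : Prop where
  /-- the function was entered at `e` … -/
  entry : AtEntry (conv u₀) Gif.L.DGifSlurp.entry (DGifSlurp.spec H rest frames F R).frame ret e
  /-- … with its precondition: `Env H rest frames F R e` (of the ENTRY memory: `HeapPre`'s region and text clauses and `Ctx` are
  memory-independent and are taken from here), `rdi = F.gif`, `F.Complete` -/
  pre : (DGifSlurp.spec H rest frames F R).pre e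
  rip : v.rip = cut
  /-- six pushes and `sub rsp, 104` below the return address -/
  rsp : v.reg .rsp = e.reg .rsp - 152
  /-- `mov rbp, rdi` (10A68EH): gif -/
  rbp : v.reg .rbp = e.reg .rdi
  /-- `mov r14, rsp ; shr r14, 3` (10A691H, 10A6AEH): the shadow index of the frame -/
  r14 : v.reg .r14 = (e.reg .rsp - 152) >>> 3
  /-- the saved registers, in push order -/
  slot_r15 : v.mem.readLE (e.reg .rsp - 8) 8 = (e.reg .r15).toNat
  slot_r14 : v.mem.readLE (e.reg .rsp - 16) 8 = (e.reg .r14).toNat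
  slot_r13 : v.mem.readLE (e.reg .rsp - 24) 8 = (e.reg .r13).toNat
  slot_r12 : v.mem.readLE (e.reg .rsp - 32) 8 = (e.reg .r12).toNat
  slot_rbp : v.mem.readLE (e.reg .rsp - 40) 8 = (e.reg .rbp).toNat
  slot_rbx : v.mem.readLE (e.reg .rsp - 48) 8 = (e.reg .rbx).toNat
  /-- the return address is still in its slot (`ret` at 10A913H pops it): no store of the body reaches `[RA, RA + 8)` — the stack
  windows (the pushes, the frame's header, the callees' frames, the three objects of the own frame) end at `RA`, the heap's region
  and the shadow lie at or above 800000H, the cursor is a stack object of a CALLER's frame, at or above `RA + 8` -/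
  slot_ra : UInt64.ofNat (v.mem.readLE (e.reg .rsp) 8) = ret
  /-- the reader did not go back (`Back2.rem`) -/
  rem : rem R v.mem ≤ rem R e.mem
  /-- the footprint so far: the function's stack (`frame = 848`), the shadow of the own frame (`[RA − 152, RA − 56)`), the contract's
  two windows -/
  same : Mem.SameExcept
    [⟨(e.reg .rsp).toNat - 848, (e.reg .rsp).toNat⟩,
     shadowSpan ((e.reg .rsp).toNat - 152) ((e.reg .rsp).toNat - 56),
     ⟨0x800000, 0x1000020⟩,
     ⟨R.cur, R.cur + 8⟩] e.mem v.mem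
  code : (conv u₀).code.In v.mem
  abi : (conv u₀).inv v

/-- **IN THE BODY**, at the address `cut`, with the PRESENT heap `Hc` and the PRESENT forest `Fc`: `Core`; `Hc` is at the place of the
entry's heap, `Fc` has the entry's gif and private object (the post's clauses); the heap's invariant for `Hc` with the OWN frame
pushed and the clean stack ending at the present stack pointer; THE STATE INVARIANT, whole, for `Hc` and `Fc`. A callee's
`Env Hc rest (framesIn frames e) Fc R s` is made of `inv` (lowered to the callee's `rsp + 8`), `core.pre`'s `HeapPre` (base, limit,
text: `SameRegion.heapPre`) and `Ctx` (with `Ctx.push` for the own frame), and `ok`: `At.env_callee` (Gif/Spec/SlurpCarry.lean). -/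
structure At (cut : Word) (H : Heap) (rest : List Obj) (frames : List (Nat × FrameLayout)) (F : Forest) (R : Rd) (Hc : Heap)
    (Fc : Forest) (u₀ e : State) (ret : Word) (v : State) : Prop where
  core : Core cut H rest frames F R u₀ e ret v
  /-- the present heap is at the place of the entry's (`Back2.region`) -/
  region : SameRegion H Hc
  /-- the present forest has the entry's gif and private object (the post's two equations) -/
  gif : Fc.gif = F.gif
  pv : Fc.pv = F.pv
  /-- the heap's invariant for the present heap, the own frame active -/
  inv : HeapInv Hc rest (framesIn frames e) ((e.reg .rsp).toNat - 152) v.mem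
  /-- the state invariant for the present heap and forest -/
  ok : GifOK Hc Fc R v.mem

/-- **AFTER THE PROLOGUE** (10A6D3H `lea rdi, [rdi + 58H]`): `At` for the entry's heap and forest (the prologue stores to the stack
and to the shadow of the stack: `HeapInv.prologue_ra`, `GifOK.storesMem`), and `rdi` still holds gif. -/
structure Start (H : Heap) (rest : List Obj) (frames : List (Nat × FrameLayout)) (F : Forest) (R : Rd) (u₀ e : State)
    (ret : Word) (v : State) : Prop where
  at_ : At Gif.L.DGifSlurp.at_10a6d3 H rest frames F R H F u₀ e ret v
  rdi : v.reg .rdi = e.reg .rdi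

/-- **AT THE HEAD OF THE RECORD LOOP** (10A82AH `lea rsi, [rsp + 20H]`, l.1197; design point SL): THE LOOP INVARIANT. `At`, every
counted image has its raster, and THE MEASURE: the input bytes left are `m`. `rbx r12 r13 r15` are dead; the three objects of the
frame hold anything. -/
structure Head (H : Heap) (rest : List Obj) (frames : List (Nat × FrameLayout)) (F : Forest) (R : Rd) (Hc : Heap) (Fc : Forest)
    (m : Nat) (u₀ e : State) (ret : Word) (v : State) : Prop where
  at_ : At Gif.L.DGifSlurp.at_10a82a H rest frames F R Hc Fc u₀ e ret v
  /-- design point SL: every counted image complete -/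
  complete : Fc.Complete
  /-- the measure of the record loop -/
  meas : rem R v.mem = m

/-- **INSIDE ONE ROUND OF THE RECORD LOOP, BETWEEN TWO RECORDS' WORK** (design point SL again): `At`, every counted image complete,
and the round has consumed input: `rem R v.mem < m` for the measure `m` of the round's head. Used at
  10A6F9H  `mov rdi, rbp` (l.1203: `RecordType = IMAGE_DESC_RECORD_TYPE`, before DGifGetImageDesc),
  10A853H  `lea rax, [rsp + 60H]` (l.1277: `RecordType = EXTENSION_RECORD_TYPE`, before DGifGetExtension),
  10A81FH  `cmp DWORD PTR [rsp + 20H], 4` (l.1315: the end of the `switch`; `RecordType` is read THERE, from the frame: any value).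
`rbx r12 r13 r15` are dead at all three. -/
structure Rec (cut : Word) (H : Heap) (rest : List Obj) (frames : List (Nat × FrameLayout)) (F : Forest) (R : Rd) (Hc : Heap)
    (Fc : Forest) (m : Nat) (u₀ e : State) (ret : Word) (v : State) : Prop where
  at_ : At cut H rest frames F R Hc Fc u₀ e ret v
  complete : Fc.Complete
  /-- the round's DGifGetRecordType consumed a byte -/
  lt : rem R v.mem < m

/-- **THE LAST COUNTED IMAGE** of the forest `Fc`: the array `s`, its counted images `init ++ [g]`; every image BEFORE the last has
its raster; the last has NO EXTENSION LIST (EX3: true from DGifGetImageDesc's `ImageCount++` until the move l.1267: the pre of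
DGifDecreaseImageCounter). The last slot is at `s.arr + 56 * init.length` (`= &SavedImages[ImageCount − 1]`). -/
structure Last (Fc : Forest) (s : Saved) (init : List Img) (g : Img) : Prop where
  saved : Fc.saved = some s
  imgs : s.imgs = init ++ [g]
  /-- the images before the last are complete -/
  done : ∀ x, x ∈ init → x.raster ≠ none
  /-- EX3 -/
  noext : g.ext = none

/-- **BEHIND A SUCCESSFUL DGifGetImageDesc** (10A70BH `lea rdi, [rbp + 48H]`, l.1207; design point IM): `At` for the heap and forest of
DGifGetImageDesc's post; the LZW field ranges (its success clause); ONE MORE counted image, WITHOUT RASTER and without extension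
list, the images before it complete (`F'.imgs = F.imgs ++ [g]` and the head's `Complete`: `complete_iff_imgs`). -/
structure IM (H : Heap) (rest : List Obj) (frames : List (Nat × FrameLayout)) (F : Forest) (R : Rd) (Hc : Heap) (Fc : Forest)
    (m : Nat) (u₀ e : State) (ret : Word) (v : State) : Prop where
  at_ : At Gif.L.DGifSlurp.at_10a70b H rest frames F R Hc Fc u₀ e ret v
  /-- the success clause of DGifGetImageDesc -/
  lz : LZOK v.mem F.pv
  /-- the last counted image has no raster yet -/
  last : ∃ (s : Saved) (init : List Img) (g : Img), Last Fc s init g ∧ g.raster = none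
  lt : rem R v.mem < m

/-- **THE IMAGE HAS A SIZE** (10A777H `imul ebx, ecx`, l.1216, behind the three range tests l.1209-1212): `IM`, and `r12 = sp`, the last
counted slot (`lea r12, [rbx + rax * 8 − 38H]` with `rbx = gif.SavedImages`, `rax = 7 · ImageCount`); `ebx = sp->ImageDesc.Width`,
`ecx = sp->ImageDesc.Height` (both zero-extended by the 32-bit loads), both at least 1 AS SIGNED ints (`test ; jle`), and
`Width ≤ INT_MAX / Height` (`idiv ecx` of `7FFFFFFFH`, `cmp ebx, eax ; jg`): `1 ≤ Width · Height < 2^31`: the `imul` does not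
overflow, `movsxd rsi, ebx` is the product, and reallocarray's pre (`1 ≤ nmemb < 2^32`) holds. -/
structure Sized (H : Heap) (rest : List Obj) (frames : List (Nat × FrameLayout)) (F : Forest) (R : Rd) (Hc : Heap) (Fc : Forest)
    (m : Nat) (u₀ e : State) (ret : Word) (v : State) : Prop where
  at_ : At Gif.L.DGifSlurp.at_10a777 H rest frames F R Hc Fc u₀ e ret v
  lz : LZOK v.mem F.pv
  /-- the last counted image, without raster; `sp` in `r12` -/
  last : ∃ (s : Saved) (init : List Img) (g : Img), Last Fc s init g ∧ g.raster = none ∧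
    (v.reg .r12).toNat = s.arr + 56 * init.length
  /-- `Width` in `ebx`, `Height` in `ecx` -/
  rbx : (v.reg .rbx).toNat = SavedImage.ImageDesc.Width v.mem (v.reg .r12).toNat
  rcx : (v.reg .rcx).toNat = SavedImage.ImageDesc.Height v.mem (v.reg .r12).toNat
  /-- the three range tests -/
  w_pos : 1 ≤ SavedImage.ImageDesc.Width v.mem (v.reg .r12).toNat
  h_pos : 1 ≤ SavedImage.ImageDesc.Height v.mem (v.reg .r12).toNat
  size : SavedImage.ImageDesc.Width v.mem (v.reg .r12).toNat * SavedImage.ImageDesc.Height v.mem (v.reg .r12).toNat < 2 ^ 31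
  lt : rem R v.mem < m

/-- **THE LAST IMAGE HAS ITS RASTER** (design point IR): `At` for the heap that holds the raster and the forest that OWNS it; the LZW
field ranges (asked by DGifGetLine, given back by it for both results; no store of this function and no callee but DGifGetLine
writes `[pv + 8, pv + 48)`); the last counted image has the raster `(r, n)` — so by `ok.shape.saved` (`RasterAt`):
`sp->RasterBits = r`, `n = Width · Height`, `1 ≤ Width`, `1 ≤ Height`, `n < 2^31`; by `ok.owns` the object `(r, n)` is live (a DATA
object: `Loose.data`, `HeapWin.live`, `Owns.liveIn` for a row of it), another object than pv (`Owns.far`), and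
`r + n + 32 ≤ C00000H` (`Owns.inside`: so `Height ≤ n < 2^24`) — and still no extension list; `r12 = sp`. EVERY counted image is
complete here. Used as it is at
  10A7D4H  `lea rdi, [rbp + 58H]` (l.1266, before the move: the joint of the two ways of reading the raster). -/
structure IR (cut : Word) (H : Heap) (rest : List Obj) (frames : List (Nat × FrameLayout)) (F : Forest) (R : Rd) (Hc : Heap)
    (Fc : Forest) (m : Nat) (u₀ e : State) (ret : Word) (v : State) : Prop where
  at_ : At cut H rest frames F R Hc Fc u₀ e ret v
  lz : LZOK v.mem F.pv
  /-- the last counted image, with its raster; `sp` in `r12` -/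
  last : ∃ (s : Saved) (init : List Img) (g : Img) (r n : Nat), Last Fc s init g ∧ g.raster = some (r, n) ∧
    (v.reg .r12).toNat = s.arr + 56 * init.length
  lt : rem R v.mem < m

/-- **BEFORE THE ONE CALL OF DGifGetLine FOR A NOT INTERLACED IMAGE** (10A7BDH `mov edx, ebx`, l.1259): `IR`, `r13` = the raster
(`mov r13, rax` at 10A78CH, stored to `sp->RasterBits` at 10A799H), `ebx = ImageSize = Width · Height` (the `imul` of 10A777H,
zero-extended): DGifGetLine's `Line = r`, `LineLen = n`, `1 ≤ n < 2^31`, the WHOLE raster. -/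
structure NI (H : Heap) (rest : List Obj) (frames : List (Nat × FrameLayout)) (F : Forest) (R : Rd) (Hc : Heap) (Fc : Forest)
    (m : Nat) (u₀ e : State) (ret : Word) (v : State) : Prop where
  ir : IR Gif.L.DGifSlurp.at_10a7bd H rest frames F R Hc Fc m u₀ e ret v
  /-- the raster in `r13`, its size in `ebx` -/
  r13 : (v.reg .r13).toNat = SavedImage.RasterBits v.mem (v.reg .r12).toNat
  rbx : (v.reg .rbx).toNat =
    SavedImage.ImageDesc.Width v.mem (v.reg .r12).toNat * SavedImage.ImageDesc.Height v.mem (v.reg .r12).toNat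

/-- **AT THE HEAD OF THE PASS LOOP** (10A948H `cmp r15d, 3`, l.1241): `IR`, and `r15 = i` (zero-extended: `mov r15d, 0`,
`add r15d, 1`) with `i + a = 4` for THE MEASURE `a` (so `i ≤ 4`). `rbx r13` are dead. -/
structure PassHead (H : Heap) (rest : List Obj) (frames : List (Nat × FrameLayout)) (F : Forest) (R : Rd) (Hc : Heap)
    (Fc : Forest) (m a : Nat) (u₀ e : State) (ret : Word) (v : State) : Prop where
  ir : IR Gif.L.DGifSlurp.at_10a948 H rest frames F R Hc Fc m u₀ e ret v
  /-- `i + a = 4` -/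
  pass : (v.reg .r15).toNat + a = 4

/-- **AT THE HEAD OF THE ROW LOOP** (10A96AH `lea rdi, [r12 + 0CH]`, l.1243): `IR`; `r15 = i` with `i + a = 4` and `1 ≤ a` (`i ≤ 3`: `i`
indexes the two tables of four `int`s, `Consts.offs` / `Consts.jumps`, registered globals: `Ctx.offs`, `Ctx.jumps`); `r13 = j`
(zero-extended), not negative as a SIGNED int (`cmp DWORD PTR [r12 + 0CH], r13d ; jle` is the C test `j < Height`), and THE MEASURE
`b = Height − j` (0 when the pass is over). In the round: `j < Height` gives the row `[r + j · Width, + Width)` ⊆ the raster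
(`(j + 1) · Width ≤ Height · Width = n`), `j · Width < 2^31` (the `imul`), and `j + InterlacedJumps[i] ≤ j + 8 < 2^31` because
`Height ≤ n < 2^24` (`Owns.inside` of the raster). `rbx` is dead. -/
structure RowHead (H : Heap) (rest : List Obj) (frames : List (Nat × FrameLayout)) (F : Forest) (R : Rd) (Hc : Heap)
    (Fc : Forest) (m a b : Nat) (u₀ e : State) (ret : Word) (v : State) : Prop where
  ir : IR Gif.L.DGifSlurp.at_10a96a H rest frames F R Hc Fc m u₀ e ret v
  /-- `i + a = 4`, `i ≤ 3` -/
  pass : (v.reg .r15).toNat + a = 4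
  pass_pos : 1 ≤ a
  /-- `j` is not negative as an `int`; `Height − j = b` -/
  row_int : (v.reg .r13).toNat < 2 ^ 31
  row : SavedImage.ImageDesc.Height v.mem (v.reg .r12).toNat - (v.reg .r13).toNat = b

/-- **AT THE HEAD OF THE SUB-BLOCK LOOP** (10A8A2H `lea rsi, [rsp + 40H]`, l.1291): `At`, every counted image complete, THE MEASURE
`rem R v.mem = k`, and `k < m` (the round of the record loop consumed input). The same behind both arms of l.1282 (W-1): the
pending list of `Fc` is whatever GifAddExtensionBlock left, or untouched. `rbx r12` are dead. -/
structure ExtHead (H : Heap) (rest : List Obj) (frames : List (Nat × FrameLayout)) (F : Forest) (R : Rd) (Hc : Heap)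
    (Fc : Forest) (m k : Nat) (u₀ e : State) (ret : Word) (v : State) : Prop where
  at_ : At Gif.L.DGifSlurp.at_10a8a2 H rest frames F R Hc Fc u₀ e ret v
  complete : Fc.Complete
  /-- the measure of the sub-block loop, below the record loop's -/
  meas : rem R v.mem = k
  lt : k < m

/-- **BEFORE THE EPILOGUE** (10A8EDH `mov QWORD PTR [r14 + C00000H], 0`; design point RET: EVERY return comes through here): `At`
for the final heap and forest, and every counted image complete: the contract's post, stated of the memory BEFORE the frame's
shadow is cleared (the epilogue clears 12 shadow bytes and pops: `HeapInv.epilogue_ra`, `GifOK.storesMem`). THE RESULT is in `ebx`: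
nothing is said of it (the contract's post says nothing about the result value). -/
structure Done (H : Heap) (rest : List Obj) (frames : List (Nat × FrameLayout)) (F : Forest) (R : Rd) (Hc : Heap) (Fc : Forest)
    (u₀ e : State) (ret : Word) (v : State) : Prop where
  at_ : At Gif.L.DGifSlurp.at_10a8ed H rest frames F R Hc Fc u₀ e ret v
  complete : Fc.Complete

/-- **An exit to the epilogue**: `Done` for A heap and A forest. -/
def Exit (H : Heap) (rest : List Obj) (frames : List (Nat × FrameLayout)) (F : Forest) (R : Rd) (u₀ e : State) (ret : Word)
    (w : State) : Prop :=
  ∃ (Hc : Heap) (Fc : Forest), Done H rest frames F R Hc Fc u₀ e ret w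

/-! ### The segment claims -/

/-- **Segment P** (the prologue, 10A680H … 10A6D3H, 16 instructions): six pushes, `sub rsp, 104`, `mov rbp, rdi`, the frame's three
header words, the shadow index in `r14`, the three poison stores (`HeapInv.prologue_ra` with `Gif.Frames.DGifSlurp_ok`,
`GifOK.storesMem`). `rdi` is not touched. -/
def SegP (Lay : Layout) (μ : Microarch) (u₀ : State) : Prop :=
  ∀ (H : Heap) (rest : List Obj) (frames : List (Nat × FrameLayout)) (F : Forest) (R : Rd) (e : State) (ret : Word),
    AtEntry (conv u₀) Gif.L.DGifSlurp.entry (DGifSlurp.spec H rest frames F R).frame ret e →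
    (DGifSlurp.spec H rest frames F R).pre e →
    ReachVia Lay μ WayInv e (Start H rest frames F R u₀ e ret)

/-- **Segment 1** (SL.0; 10A6D3H … 10A6F9H, l.1193-1194, 7 instructions, no contract call): the checked store
`gif.ExtensionBlocks = NULL` (`[gif + 88, gif + 96)`), the checked store `gif.ExtensionBlockCount = 0` (`[gif + 80, gif + 84)`), `jmp`
to the loop head. ONE step `Shape.set_pend` with `none` (`ExtsAt none 0 0`); the forest is `{ F with pend := none }` (on the path
`F.pend = none` already: the stores write 0 over 0; the contract's pre does not say so, and the claim does not need it:
`owned_drop_pend`, `Owns.sublist`); `Complete` reads `saved` only. The heap is the entry's; the measure is whatever is left. -/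
def Seg1 (Lay : Layout) (μ : Microarch) (u₀ : State) : Prop :=
  ∀ (H : Heap) (rest : List Obj) (frames : List (Nat × FrameLayout)) (F : Forest) (R : Rd) (e : State) (ret : Word) (v : State),
    Start H rest frames F R u₀ e ret v →
    ReachVia Lay μ WayInv v (fun w =>
      ∃ (Fc : Forest) (m : Nat), Head H rest frames F R H Fc m u₀ e ret w)

/-- **Segment 2** (SL.H; THE HEAD OF THE RECORD LOOP 10A82AH … 10A853H, l.1197-1201, 11 instructions):
`DGifGetRecordType(gif, &RecordType)` — `rsi = rsp + 20H`: the frame's object `RecordType` (`OutPtr`: a stack object of the own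
frame, below the cursor) —; `ebx = eax`. GIF_ERROR: to the epilogue (same heap, same forest: `Back`). GIF_OK: the reader advanced
by exactly 1 (`rem R w.mem + 1 = m`), `RecordType` ∈ {2, 3, 4}: `mov eax, [rsp + 20H]`; 2: to 10A6F9H; 3: to 10A853H; otherwise
(`jne`) to 10A81FH. -/
def Seg2 (Lay : Layout) (μ : Microarch) (u₀ : State) : Prop :=
  ∀ (H : Heap) (rest : List Obj) (frames : List (Nat × FrameLayout)) (F : Forest) (R : Rd) (Hc : Heap) (Fc : Forest) (m : Nat)
    (e : State) (ret : Word) (v : State),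
    Head H rest frames F R Hc Fc m u₀ e ret v →
    ReachVia Lay μ WayInv v (fun w =>
      Rec Gif.L.DGifSlurp.at_10a6f9 H rest frames F R Hc Fc m u₀ e ret w ∨
      Rec Gif.L.DGifSlurp.at_10a853 H rest frames F R Hc Fc m u₀ e ret w ∨
      Rec Gif.L.DGifSlurp.at_10a81f H rest frames F R Hc Fc m u₀ e ret w ∨
      Exit H rest frames F R u₀ e ret w)

/-- **Segment 3** (SL.I; 10A6F9H … 10A70BH, l.1203, 5 instructions): `DGifGetImageDesc(gif)` (its contract for `Hc`, `Fc`, the frames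
`framesIn frames e`: the post gives `H'`, `F'` with `Back2`, `Fc.SameButIcmSaved F'`); `ebx = eax`. GIF_ERROR: `F'.imgs = Fc.imgs`:
every counted image is complete still (`complete_iff_imgs`): to the epilogue — WITHOUT DGifDecreaseImageCounter: the slot was not
counted. GIF_OK: `LZOK`, `F'.imgs = Fc.imgs ++ [g]` with `g.raster = none`, `g.ext = none`: to 10A70BH. -/
def Seg3 (Lay : Layout) (μ : Microarch) (u₀ : State) : Prop :=
  ∀ (H : Heap) (rest : List Obj) (frames : List (Nat × FrameLayout)) (F : Forest) (R : Rd) (Hc : Heap) (Fc : Forest) (m : Nat)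
    (e : State) (ret : Word) (v : State),
    Rec Gif.L.DGifSlurp.at_10a6f9 H rest frames F R Hc Fc m u₀ e ret v →
    ReachVia Lay μ WayInv v (fun w =>
      (∃ (H' : Heap) (F' : Forest), IM H rest frames F R H' F' m u₀ e ret w) ∨
      Exit H rest frames F R u₀ e ret w)

/-- **Segment 4** (SL.I1; 10A70BH … 10A777H and 10A914H … 10A923H, l.1207-1214, 24 + 4 instructions): the checked loads of
`gif.SavedImages` (`= s.arr`) and `gif.ImageCount` (`= init.length + 1`, sign-extended: below `2^18` by `Owns.inside` of the array),
`r12 = s.arr + 56 · (ImageCount − 1)`: the last counted slot, inside the live array; the checked loads of `sp->ImageDesc.Width`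
(`ebx`) and `->Height` (`ecx`); `test ; jle` twice, `mov eax, 7FFFFFFFH ; mov edx, 0 ; idiv ecx` (the divisor is at least 1 and
the quotient fits: no `#DE`), `cmp ebx, eax ; jg`. A test fails (10A914H): `DGifDecreaseImageCounter(gif)` (ghosts `init`, `g`; its
pre: `Fc.imgs = init ++ [g]`, `g.ext = none`; its post: `F'.imgs = init`: complete), `ebx = 0`, to the epilogue. Otherwise to
10A777H with the same heap and forest. -/
def Seg4 (Lay : Layout) (μ : Microarch) (u₀ : State) : Prop :=
  ∀ (H : Heap) (rest : List Obj) (frames : List (Nat × FrameLayout)) (F : Forest) (R : Rd) (Hc : Heap) (Fc : Forest) (m : Nat)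
    (e : State) (ret : Word) (v : State),
    IM H rest frames F R Hc Fc m u₀ e ret v →
    ReachVia Lay μ WayInv v (fun w =>
      Sized H rest frames F R Hc Fc m u₀ e ret w ∨
      Exit H rest frames F R u₀ e ret w)

/-- **Segment 5** (SL.I2; 10A777H … 10A7BDH, 10A923H … 10A932H, 10A942H … 10A948H; l.1216-1230, 1241; 15 + 4 + 1 instructions):
`imul ebx, ecx` (`ImageSize`, no overflow), `rsi = ImageSize`, `edx = 1`, `edi = 0`: `openbsd_reallocarray(NULL, ImageSize, 1)`
(`AllocPost` for `n = ImageSize · 1`, capacity `r16 n`); `r13 = rax`; the checked store of `r13` to `sp->RasterBits` (`sp + 32`,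
inside the live array; also when it is NULL: the field held NULL).
  NULL (`FailPost`: nothing but stack written; 10A923H): `DGifDecreaseImageCounter(gif)`, `ebx = 0`, to the epilogue.
  SUCCESS: the heap is `Hc.push n (r16 n)`, the raster `r = Hc.next`; THE ADOPTION: the forest is `Fc` with the last image's
  `raster := some (r, n)` — `GifOK.through_alloc`, then `Shape.set_saved` with `SavedAt.set_last` (`RasterAt (some (r, n))` from the
  stored pointer and `Sized`'s three facts; the slot's other fields are as they were), `Owns.push_cons` and `owned_set_raster` —;
  `LZOK` by `LZOK.frame` (nothing written meets pv). Then the checked byte load of `sp->ImageDesc.Interlace` (`sp + 16`): 0: to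
  10A7BDH (`r13 = r`, `ebx = n`); otherwise `r15d = 0` (10A942H), to the pass head with `a = 4`. -/
def Seg5 (Lay : Layout) (μ : Microarch) (u₀ : State) : Prop :=
  ∀ (H : Heap) (rest : List Obj) (frames : List (Nat × FrameLayout)) (F : Forest) (R : Rd) (Hc : Heap) (Fc : Forest) (m : Nat)
    (e : State) (ret : Word) (v : State),
    Sized H rest frames F R Hc Fc m u₀ e ret v →
    ReachVia Lay μ WayInv v (fun w =>
      (∃ (H' : Heap) (F' : Forest), NI H rest frames F R H' F' m u₀ e ret w) ∨
      (∃ (H' : Heap) (F' : Forest) (a : Nat), PassHead H rest frames F R H' F' m a u₀ e ret w) ∨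
      Exit H rest frames F R u₀ e ret w)

/-- **Segment 6** (SL.NI; 10A7BDH … 10A7D4H and 10A9C0H … 10A9CDH, l.1259-1262, 7 + 3 instructions): `edx = ebx`, `rsi = r13`,
`DGifGetLine(gif, r, n)` (ghost `n`; `BufOK` of the whole raster: `Owns.liveIn`, `Loose.data`, `HeapWin.live`; `r ≥ 700000H`; the
raster does not meet pv: `Owns.far`); `ebx = eax`. GIF_ERROR (10A9C0H): `DGifDecreaseImageCounter(gif)` (the last image has a raster
and no extension list: its pre holds; it frees the raster), to the epilogue with `ebx = 0` still. GIF_OK: to the move, same heap,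
same forest (`Back`), `LZOK` again. -/
def Seg6 (Lay : Layout) (μ : Microarch) (u₀ : State) : Prop :=
  ∀ (H : Heap) (rest : List Obj) (frames : List (Nat × FrameLayout)) (F : Forest) (R : Rd) (Hc : Heap) (Fc : Forest) (m : Nat)
    (e : State) (ret : Word) (v : State),
    NI H rest frames F R Hc Fc m u₀ e ret v →
    ReachVia Lay μ WayInv v (fun w =>
      IR Gif.L.DGifSlurp.at_10a7d4 H rest frames F R Hc Fc m u₀ e ret w ∨
      Exit H rest frames F R u₀ e ret w)

/-- **Segment 7** (SL.IL; THE HEAD OF THE PASS LOOP 10A948H … 10A96AH, l.1241-1242, 6 instructions, no contract call):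
`cmp r15d, 3 ; jg`: `i ≥ 4` (`a = 0`): to the move. Otherwise `rbx = i`, the checked load of `InterlacedOffset[i]`
(`141340H + 4 · i`, inside the registered global `Ctx.offs`; its value by `Consts.offs`: 0, 4, 2 or 1) into `r13d`: to the row head
with `j` = that value and `b = Height − j`. -/
def Seg7 (Lay : Layout) (μ : Microarch) (u₀ : State) : Prop :=
  ∀ (H : Heap) (rest : List Obj) (frames : List (Nat × FrameLayout)) (F : Forest) (R : Rd) (Hc : Heap) (Fc : Forest) (m a : Nat)
    (e : State) (ret : Word) (v : State),
    PassHead H rest frames F R Hc Fc m a u₀ e ret v →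
    ReachVia Lay μ WayInv v (fun w =>
      (∃ (b : Nat), RowHead H rest frames F R Hc Fc m a b u₀ e ret w) ∨
      IR Gif.L.DGifSlurp.at_10a7d4 H rest frames F R Hc Fc m u₀ e ret w)

/-- **Segment 8** (SL.IL; THE HEAD OF THE ROW LOOP 10A96AH … 10A9C0H and 10A932H … 10A942H, l.1243-1254, 4 + 12 + 5 + 2 + 3
instructions): the checked load of `sp->ImageDesc.Height`, `cmp [r12 + 0CH], r13d ; jle`:
  `Height ≤ j` (10A93CH): `add r15d, 1`, to the pass head with the measure `a − 1`.
  `j < Height`: the checked load of `sp->ImageDesc.Width` (`edx`), `esi = Width · j` (`imul`: below `2^31`), sign-extended, plus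
  `sp->RasterBits` (an UNCHECKED load: gcc checked the field at 10A794H): `DGifGetLine(gif, r + j · Width, Width)` (ghost `n = Width`,
  at least 1; `BufOK` of the row, a part of the raster; it does not meet pv); `ebx = eax`.
    GIF_ERROR (10A932H): `DGifDecreaseImageCounter(gif)`, to the epilogue.
    GIF_OK: `rbx = i`, the checked load of `InterlacedJumps[i]` (`141300H + 4 · i`: `Ctx.jumps`, `Consts.jumps`: 8, 8, 4 or 2),
    `add r13d, …`: back to the row head with `j + jump < 2^31`, the measure `Height − (j + jump) < Height − j`; the same heap and
    forest (`Back`), `LZOK` again, `sp`'s slot unchanged (DGifGetLine's footprint misses the array: `Owns.far`). -/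
def Seg8 (Lay : Layout) (μ : Microarch) (u₀ : State) : Prop :=
  ∀ (H : Heap) (rest : List Obj) (frames : List (Nat × FrameLayout)) (F : Forest) (R : Rd) (Hc : Heap) (Fc : Forest) (m a b : Nat)
    (e : State) (ret : Word) (v : State),
    RowHead H rest frames F R Hc Fc m a b u₀ e ret v →
    ReachVia Lay μ WayInv v (fun w =>
      (∃ (b' : Nat), b' < b ∧ RowHead H rest frames F R Hc Fc m a b' u₀ e ret w) ∨
      (∃ (a' : Nat), a' < a ∧ PassHead H rest frames F R Hc Fc m a' u₀ e ret w) ∨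
      Exit H rest frames F R u₀ e ret w)

/-- **Segment 9** (SL.M; THE MOVE 10A7D4H … 10A81FH, l.1266-1273, 16 instructions, no contract call): the checked load of
`gif.ExtensionBlocks`; NULL (`Fc.pend = none`): to 10A81FH, the same forest. Otherwise the pending list `x` (`ok.shape.pend`): the
checked store of the pointer to `sp->ExtensionBlocks` (`sp + 48`), the checked load of `gif.ExtensionBlockCount`, the checked
store of it to `sp->ExtensionBlockCount` (`sp + 40`), and the two UNCHECKED stores `gif.ExtensionBlocks = NULL`,
`gif.ExtensionBlockCount = 0`. THE FOUR STORES ARE ONE STEP: `Shape.set_saved_pend` from the forest `Fc` to the forest with the last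
image's `ext := Fc.pend` and `pend := none` (`SavedAt.set_last`: `ExtsAt (some x)` of the slot's pair is `ok.shape.pend`'s, the
blocks untouched; `ExtsAt none 0 0`), `Forest.owned_move_pend` with `Owns.perm` (no object moves): the whole step is
`GifOK.move_pend` (Gif/Spec/SlurpCarry.lean), the new forest `Forest.movedPend`. In both cases every counted image is complete (the
last has its raster). `r12` is dead afterwards. -/
def Seg9 (Lay : Layout) (μ : Microarch) (u₀ : State) : Prop :=
  ∀ (H : Heap) (rest : List Obj) (frames : List (Nat × FrameLayout)) (F : Forest) (R : Rd) (Hc : Heap) (Fc : Forest) (m : Nat)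
    (e : State) (ret : Word) (v : State),
    IR Gif.L.DGifSlurp.at_10a7d4 H rest frames F R Hc Fc m u₀ e ret v →
    ReachVia Lay μ WayInv v (fun w =>
      ∃ (F' : Forest), Rec Gif.L.DGifSlurp.at_10a81f H rest frames F R Hc F' m u₀ e ret w)

/-- **Segment 10** (SL.E; 10A853H … 10A8A2H, l.1277-1289, 23 instructions): `rsi = rsp + 30H` (`&ExtFunction`), `rdx = rsp + 40H`
(`&ExtData`): two objects of the own frame (`OutPtr` twice, 12 bytes apart); `DGifGetExtension(gif, &ExtFunction, &ExtData)`;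
`ebx = eax`; GIF_ERROR: to the epilogue. GIF_OK: `rbx = ExtData` (a load from the own frame): NULL (l.1282, W-1): to the sub-block
head. Otherwise `ExtData = pv + 88` (`&pv.Buf`), `Buf[0]` between 1 and 255: `r12 = pv + 89`, the checked byte load of `Buf[0]`
(`ecx`), `edx = ExtFunction`, `rsi = gif + 88`, `rdi = gif + 80`, `r8 = r12`: `GifAddExtensionBlock` (ghost `len = Buf[0]`;
`[pv + 89, pv + 89 + len) ⊆ [pv + 88, pv + 344)`); its post: `H'`, `F'` with `Back2`, `Fc.SameButPend F'`, `rem` unchanged; `ebx = eax`;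
GIF_ERROR: to the epilogue (`F'.saved = Fc.saved`: complete); GIF_OK: to the sub-block head. `rem` went down: `k < m` still. -/
def Seg10 (Lay : Layout) (μ : Microarch) (u₀ : State) : Prop :=
  ∀ (H : Heap) (rest : List Obj) (frames : List (Nat × FrameLayout)) (F : Forest) (R : Rd) (Hc : Heap) (Fc : Forest) (m : Nat)
    (e : State) (ret : Word) (v : State),
    Rec Gif.L.DGifSlurp.at_10a853 H rest frames F R Hc Fc m u₀ e ret v →
    ReachVia Lay μ WayInv v (fun w =>
      (∃ (H' : Heap) (F' : Forest) (k : Nat), ExtHead H rest frames F R H' F' m k u₀ e ret w) ∨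
      Exit H rest frames F R u₀ e ret w)

/-- **Segment 11** (SL.E1; THE HEAD OF THE SUB-BLOCK LOOP 10A8A2H … 10A8EDH, l.1290-1306, 21 instructions):
`DGifGetExtensionNext(gif, &ExtData)` (`rsi = rsp + 40H`); `ebx = eax`; GIF_ERROR: to the epilogue. GIF_OK (`BlockPost`):
`rbx = ExtData`: NULL: one byte consumed, the record is done: to 10A81FH with the same heap and forest. Otherwise `ExtData = pv + 88`,
`Buf[0]` between 1 and 255, at least two bytes consumed: `r12 = pv + 89`, the checked byte load of `Buf[0]`, `GifAddExtensionBlock`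
with `edx = 0` (CONTINUE_EXT_FUNC_CODE); `ebx = eax`; GIF_ERROR: to the epilogue; GIF_OK (`jne`): back to the head with the heap and
forest of its post and a measure `k' < k`. -/
def Seg11 (Lay : Layout) (μ : Microarch) (u₀ : State) : Prop :=
  ∀ (H : Heap) (rest : List Obj) (frames : List (Nat × FrameLayout)) (F : Forest) (R : Rd) (Hc : Heap) (Fc : Forest) (m k : Nat)
    (e : State) (ret : Word) (v : State),
    ExtHead H rest frames F R Hc Fc m k u₀ e ret v →
    ReachVia Lay μ WayInv v (fun w =>
      (∃ (H' : Heap) (F' : Forest) (k' : Nat), k' < k ∧ ExtHead H rest frames F R H' F' m k' u₀ e ret w) ∨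
      Rec Gif.L.DGifSlurp.at_10a81f H rest frames F R Hc Fc m u₀ e ret w ∨
      Exit H rest frames F R u₀ e ret w)

/-- **Segment 12** (SL.W, SL.X; 10A81FH … 10A82AH and 10A9CDH … 10A9FCH, l.1315-1323, 2 + 11 instructions, no contract call):
`cmp DWORD PTR [rsp + 20H], 4 ; je`: `RecordType ≠ TERMINATE_RECORD_TYPE`: back to the head of the record loop with the measure
`rem R w.mem < m`. Otherwise (10A9CDH) the checked load of `gif.ImageCount`: not 0: `ebx = 1`; 0 (10A9E7H): the checked store of
`gif.Error = 69H` (`[gif + 96, gif + 100)`: a scalar field of gif, `Loose`), `ebx = 0`; to the epilogue with the same heap and forest. -/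
def Seg12 (Lay : Layout) (μ : Microarch) (u₀ : State) : Prop :=
  ∀ (H : Heap) (rest : List Obj) (frames : List (Nat × FrameLayout)) (F : Forest) (R : Rd) (Hc : Heap) (Fc : Forest) (m : Nat)
    (e : State) (ret : Word) (v : State),
    Rec Gif.L.DGifSlurp.at_10a81f H rest frames F R Hc Fc m u₀ e ret v →
    ReachVia Lay μ WayInv v (fun w =>
      (∃ (m' : Nat), m' < m ∧ Head H rest frames F R Hc Fc m' u₀ e ret w) ∨
      Exit H rest frames F R u₀ e ret w)

/-- **Segment E** (the epilogue, 10A8EDH … `ret`, 11 instructions): the 8-byte and the 4-byte store that clear the frame's shadow,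
`mov eax, ebx`, `add rsp, 104`, six pops, `ret`. The contract's post from `Done`: `Back2` (`region`, `inv` through
`HeapInv.epilogue_ra`, `ok` through `GifOK.storesMem`, `core.rem`), `gif`, `pv`, `complete`. -/
def SegE (Lay : Layout) (μ : Microarch) (u₀ : State) : Prop :=
  ∀ (H : Heap) (rest : List Obj) (frames : List (Nat × FrameLayout)) (F : Forest) (R : Rd) (Hc : Heap) (Fc : Forest)
    (e : State) (ret : Word) (v : State),
    Done H rest frames F R Hc Fc u₀ e ret v →
    ReachVia Lay μ WayInv v (Returned (conv u₀) (DGifSlurp.spec H rest frames F R) e ret)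

/-! ### The composition -/

/-- **The composition of `DGifSlurp`**: the fourteen segments chain into the function's contract. The record loop by a strong
induction on its measure `m`; inside one round the sub-block loop by a strong induction on `k`, the pass loop on `a` and, inside
it, the row loop on `b`. -/
theorem compose {Lay : Layout} {μ : Microarch} {u₀ : State} (hP : SegP Lay μ u₀) (h1 : Seg1 Lay μ u₀) (h2 : Seg2 Lay μ u₀)
    (h3 : Seg3 Lay μ u₀) (h4 : Seg4 Lay μ u₀) (h5 : Seg5 Lay μ u₀) (h6 : Seg6 Lay μ u₀) (h7 : Seg7 Lay μ u₀) (h8 : Seg8 Lay μ u₀)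
    (h9 : Seg9 Lay μ u₀) (h10 : Seg10 Lay μ u₀) (h11 : Seg11 Lay μ u₀) (h12 : Seg12 Lay μ u₀) (hE : SegE Lay μ u₀) :
    ∀ (H : Heap) (rest : List Obj) (frames : List (Nat × FrameLayout)) (F : Forest) (R : Rd),
      Calls Lay μ WayInv (conv u₀) Gif.L.DGifSlurp.entry (DGifSlurp.spec H rest frames F R) := by
  intro H rest frames F R e ret he hp
  -- from any exit to the epilogue: segment E
  have tail : ∀ w, Exit H rest frames F R u₀ e ret w →
      ReachVia Lay μ WayInv w (Returned (conv u₀) (DGifSlurp.spec H rest frames F R) e ret) := by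
    intro w hw
    obtain ⟨Hc, Fc, hd⟩ := hw
    exact hE H rest frames F R Hc Fc e ret w hd
  -- from the head of the record loop: by strong induction on the measure
  have loop : ∀ (m : Nat) (Hc : Heap) (Fc : Forest) (x : State),
      Head H rest frames F R Hc Fc m u₀ e ret x →
      ReachVia Lay μ WayInv x (Returned (conv u₀) (DGifSlurp.spec H rest frames F R) e ret) := by
    intro m
    induction m using Nat.strongRecOn with
    | _ m ih =>
      intro Hc Fc x hx
      -- from the end of the `switch` (10A81FH): segment 12, then the next round or the epilogue
      have fromW : ∀ (Hw : Heap) (Fw : Forest) (y : State),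
          Rec Gif.L.DGifSlurp.at_10a81f H rest frames F R Hw Fw m u₀ e ret y →
          ReachVia Lay μ WayInv y (Returned (conv u₀) (DGifSlurp.spec H rest frames F R) e ret) := by
        intro Hw Fw y hy
        refine (h12 H rest frames F R Hw Fw m e ret y hy).trans ?_
        intro z hz
        rcases hz with hhead | hexit
        · obtain ⟨m', hlt, hh⟩ := hhead
          exact ih m' hlt Hw Fw z hh
        · exact tail z hexit
      -- from the move (10A7D4H): segment 9, then the end of the `switch`
      have fromMove : ∀ (Hw : Heap) (Fw : Forest) (y : State),
          IR Gif.L.DGifSlurp.at_10a7d4 H rest frames F R Hw Fw m u₀ e ret y →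
          ReachVia Lay μ WayInv y (Returned (conv u₀) (DGifSlurp.spec H rest frames F R) e ret) := by
        intro Hw Fw y hy
        refine (h9 H rest frames F R Hw Fw m e ret y hy).trans ?_
        intro z hz
        obtain ⟨F', hr⟩ := hz
        exact fromW Hw F' z hr
      -- from the head of the sub-block loop: by strong induction on its measure
      have ext : ∀ (k : Nat) (Hw : Heap) (Fw : Forest) (y : State),
          ExtHead H rest frames F R Hw Fw m k u₀ e ret y →
          ReachVia Lay μ WayInv y (Returned (conv u₀) (DGifSlurp.spec H rest frames F R) e ret) := by
        intro k
        induction k using Nat.strongRecOn with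
        | _ k ihk =>
          intro Hw Fw y hy
          refine (h11 H rest frames F R Hw Fw m k e ret y hy).trans ?_
          intro z hz
          rcases hz with hagain | hrec | hexit
          · obtain ⟨H', F', k', hlt, hh⟩ := hagain
            exact ihk k' hlt H' F' z hh
          · exact fromW Hw Fw z hrec
          · exact tail z hexit
      -- from the head of the pass loop: by strong induction on its measure; inside, the row loop on its own
      have pass : ∀ (a : Nat) (Hw : Heap) (Fw : Forest) (y : State),
          PassHead H rest frames F R Hw Fw m a u₀ e ret y →
          ReachVia Lay μ WayInv y (Returned (conv u₀) (DGifSlurp.spec H rest frames F R) e ret) := by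
        intro a
        induction a using Nat.strongRecOn with
        | _ a iha =>
          intro Hw Fw y hy
          have row : ∀ (b : Nat) (z : State),
              RowHead H rest frames F R Hw Fw m a b u₀ e ret z →
              ReachVia Lay μ WayInv z (Returned (conv u₀) (DGifSlurp.spec H rest frames F R) e ret) := by
            intro b
            induction b using Nat.strongRecOn with
            | _ b ihb =>
              intro z hz
              refine (h8 H rest frames F R Hw Fw m a b e ret z hz).trans ?_
              intro t ht
              rcases ht with hrow | hpass | hexit
              · obtain ⟨b', hlt, hh⟩ := hrow
                exact ihb b' hlt t hh
              · obtain ⟨a', hlt, hh⟩ := hpass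
                exact iha a' hlt Hw Fw t hh
              · exact tail t hexit
          refine (h7 H rest frames F R Hw Fw m a e ret y hy).trans ?_
          intro z hz
          rcases hz with hrow | hmove
          · obtain ⟨b, hh⟩ := hrow
            exact row b z hh
          · exact fromMove Hw Fw z hmove
      -- one round: the head, then the dispatch
      refine (h2 H rest frames F R Hc Fc m e ret x hx).trans ?_
      intro y hy
      rcases hy with himage | hext | hw | hexit
      · -- an image record
        refine (h3 H rest frames F R Hc Fc m e ret y himage).trans ?_
        intro z hz
        rcases hz with him | hexit3
        · obtain ⟨H3, F3, him'⟩ := him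
          refine (h4 H rest frames F R H3 F3 m e ret z him').trans ?_
          intro t ht
          rcases ht with hsized | hexit4
          · refine (h5 H rest frames F R H3 F3 m e ret t hsized).trans ?_
            intro s hs
            rcases hs with hni | hil | hexit5
            · obtain ⟨H5, F5, hni'⟩ := hni
              refine (h6 H rest frames F R H5 F5 m e ret s hni').trans ?_
              intro r hr
              rcases hr with hmove | hexit6
              · exact fromMove H5 F5 r hmove
              · exact tail r hexit6
            · obtain ⟨H5, F5, a, hil'⟩ := hil
              exact pass a H5 F5 s hil'
            · exact tail s hexit5
          · exact tail t hexit4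
        · exact tail z hexit3
      · -- an extension record
        refine (h10 H rest frames F R Hc Fc m e ret y hext).trans ?_
        intro z hz
        rcases hz with hhead | hexit10
        · obtain ⟨H', F', k, hh⟩ := hhead
          exact ext k H' F' z hh
        · exact tail z hexit10
      · -- the terminator (or a record type the `switch` ignores)
        exact fromW Hc Fc y hw
      · exact tail y hexit
  -- the straight part: the prologue, the two stores, the first head
  refine (hP H rest frames F R e ret he hp).trans ?_
  intro v1 hv1
  refine (h1 H rest frames F R e ret v1 hv1).trans ?_
  intro v2 hv2
  obtain ⟨Fc, m, hh⟩ := hv2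
  exact loop m H Fc v2 hh

end DGifSlurp

end Gif.Spec
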